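-- pv_equiv track=rewrite | github.com/lexofficial29/Bioinformatics | lab7/lab7_2.py | find_all_pattern_repeats
-- ===== SOURCE A (Python) =====
-- from collections import Counter
--
-- def find_all_pattern_repeats(seq):
--     pattern_counts = Counter()
--     seq = seq.upper()
--     for size in range(3, 7):
--         for i in range(len(seq) - size):
--             pattern = seq[i:i + size]
--             repeats = 0
--             pos = i
--             while seq[pos:pos + size] == pattern:
--                 repeats += 1
--                 pos += size
--             if repeats > 1:
--                 full_repeat = seq[i:i + repeats * size]
--                 pattern_counts[full_repeat] += 1
--     return pattern_counts
-- ===== SOURCE B (Python) =====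
-- def find_all_pattern_repeats(seq):
--     seq = seq.upper()
--     n = len(seq)
--     counts = {}
--     for size in range(3, 7):
--         # run-length DP: rep[i] = number of consecutive copies of seq[i:i+size] starting at i
--         rep = [1] * n
--         for i in range(n - 2 * size, -1, -1):
--             if seq[i:i + size] == seq[i + size:i + 2 * size]:
--                 rep[i] = rep[i + size] + 1
--         for i in range(n - size):
--             r = rep[i]
--             if r > 1:
--                 full = seq[i:i + r * size]
--                 counts[full] = counts.get(full, 0) + 1
--     return counts
-- ===== Notes on version B (the rewrite author's own statement) =====
-- stated objective: faster
-- what changed: Replaces the per-position while-loop that rescans the whole run of each pattern with a per-size backward dynamic-programming array rep[i] = rep[i+size]+1 built once, so each run length is read in O(1).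
import Mathlib
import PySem

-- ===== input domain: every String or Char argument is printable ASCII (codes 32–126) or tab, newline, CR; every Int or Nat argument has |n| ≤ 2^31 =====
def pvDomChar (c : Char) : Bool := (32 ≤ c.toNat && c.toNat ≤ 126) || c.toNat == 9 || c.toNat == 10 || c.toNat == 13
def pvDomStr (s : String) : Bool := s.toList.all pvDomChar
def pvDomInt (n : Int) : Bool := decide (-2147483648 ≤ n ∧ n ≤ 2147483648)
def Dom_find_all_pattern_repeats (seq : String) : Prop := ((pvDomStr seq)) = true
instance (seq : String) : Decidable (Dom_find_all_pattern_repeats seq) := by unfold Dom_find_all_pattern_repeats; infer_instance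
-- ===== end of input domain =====

-- B replaces A's per-position while-loop rescan of each tandem run by a per-size
-- backward DP array of run lengths (objective: faster on repetitive inputs).

-- ===== PORT A =====
-- A's while loop: counts consecutive copies of `pat` starting at `pos`.
-- The fuel argument only makes the loop total; `u.length + 1` steps always suffice.
def pvWhileA (u pat : List Char) (size : Int) : Nat → Int → Nat
  | 0, _ => 0
  | fuel + 1, pos =>
    if PySem.List.slice u (some pos) (some (pos + size)) = pat
    then pvWhileA u pat size fuel (pos + size) + 1
    else 0

def find_all_pattern_repeats (seq : String) : List (String × Int) :=
  let u := PySem.Chars.upper seq.toList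
  ((PySem.List.pyRange 3 7 1).foldl (fun d size =>
    (PySem.List.pyRange 0 ((u.length : Int) - size) 1).foldl (fun d i =>
      let pattern := PySem.List.slice u (some i) (some (i + size))
      let repeats := pvWhileA u pattern size (u.length + 1) i
      if repeats > 1 then
        let full_repeat := PySem.List.slice u (some i) (some (i + (repeats : Int) * size))
        d.modify (String.ofList full_repeat) 0 (· + 1)
      else d) d)
    (PySem.Dict.empty : PySem.Dict String Int)).items

-- ===== PORT B =====
def find_all_pattern_repeats_alt (seq : String) : List (String × Int) :=
  let u := PySem.Chars.upper seq.toList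
  let n : Int := u.length
  ((PySem.List.pyRange 3 7 1).foldl (fun d size =>
    let rep := (PySem.List.pyRange (n - 2 * size) (-1) (-1)).foldl (fun rep i =>
      if PySem.List.slice u (some i) (some (i + size)) =
         PySem.List.slice u (some (i + size)) (some (i + 2 * size))
      then rep.set i.toNat (PySem.List.pyGetD rep (i + size) 1 + 1)
      else rep) (List.replicate u.length (1 : Int))
    (PySem.List.pyRange 0 (n - size) 1).foldl (fun d i =>
      let r := PySem.List.pyGetD rep i 1
      if r > 1 then
        let full := PySem.List.slice u (some i) (some (i + r * size))
        d.insert (String.ofList full) (d.getD (String.ofList full) 0 + 1)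
      else d) d)
    (PySem.Dict.empty : PySem.Dict String Int)).items

-- ===== PRECONDITION & SPEC =====
def Spec_find_all_pattern_repeats (seq : String) (out : List (String × Int)) : Prop := out = find_all_pattern_repeats_alt seq
instance (seq : String) (out : List (String × Int)) : Decidable (Spec_find_all_pattern_repeats seq out) := by unfold Spec_find_all_pattern_repeats; infer_instance

-- ===== CLAIM (what is proved, stated in full; the proofs are below) =====
def Claim_equal_find_all_pattern_repeats : Prop := ∀ (seq : String), Dom_find_all_pattern_repeats seq → Spec_find_all_pattern_repeats seq (find_all_pattern_repeats seq)

-- ===== LEMMAS AND PROOFS =====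

-- `block u s i` is seq[i:i+s] for natural indices (what both Python slices denote).
def pvBlock (u : List Char) (s i : Nat) : List Char := (u.drop i).take s

-- the mathematical run length both programs compute
def pvRepF (u : List Char) (s : Nat) (hs : 0 < s) (i : Nat) : Nat :=
  if h : i + 2 * s ≤ u.length ∧ pvBlock u s i = pvBlock u s (i + s)
  then pvRepF u s hs (i + s) + 1
  else 1
termination_by u.length - i
decreasing_by omega

theorem pvBlock_len {u : List Char} {s i : Nat} (h : i + s ≤ u.length) :
    (pvBlock u s i).length = s := by
  simp [pvBlock]; omega

-- A's while loop computes pvRepF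
theorem pvWhileA_eq (u : List Char) (s : Nat) (hs : 0 < s) :
    ∀ (fuel p : Nat), p + s ≤ u.length → u.length - p < fuel →
      pvWhileA u (pvBlock u s p) (s : Int) fuel (p : Int) = pvRepF u s hs p := by
  intro fuel
  induction fuel with
  | zero => intro p h1 h2; omega
  | succ f ih =>
    intro p h1 h2
    have hcast : (p : Int) + (s : Int) = ((p + s : Nat) : Int) := by push_cast; ring
    have hslice : PySem.List.slice u (some (p : Int)) (some ((p : Int) + (s : Int)))
        = pvBlock u s p := by
      rw [hcast, PySem.List.slice_natCast]
      simp [pvBlock]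
    rw [pvWhileA, if_pos hslice]
    by_cases hb : pvBlock u s (p + s) = pvBlock u s p
    · -- next block matches: recurse
      have hlen2 : p + 2 * s ≤ u.length := by
        have l1 : (pvBlock u s p).length = s := pvBlock_len h1
        have l2 : (pvBlock u s (p + s)).length = s := by rw [hb]; exact l1
        simp [pvBlock] at l2; omega
      have hf : u.length - (p + s) < f := by omega
      have := ih (p + s) (by omega) hf
      rw [hcast, ← hb, this]
      conv_rhs => rw [pvRepF]
      rw [dif_pos ⟨hlen2, hb.symm⟩]
    · -- mismatch: one more unfold of the while loop gives 0
      have hf1 : 1 ≤ f := by omega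
      obtain ⟨f', rfl⟩ : ∃ f', f = f' + 1 := ⟨f - 1, by omega⟩
      have hcast2 : ((p + s : Nat) : Int) + (s : Int) = ((p + s + s : Nat) : Int) := by
        push_cast; ring
      rw [hcast, pvWhileA, hcast2, PySem.List.slice_natCast, if_neg]
      · rw [pvRepF, dif_neg]
        rintro ⟨-, hEq⟩
        exact hb hEq.symm
      · intro hEq
        apply hb
        simpa [pvBlock] using hEq

-- B's backward DP loop fills the array with pvRepF
theorem pvGet_set_self (xs : List Int) (a : Nat) (v : Int) (h : a < xs.length) :
    PySem.List.pyGetD (xs.set a v) (a : Int) 1 = v := by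
  rw [PySem.List.pyGetD_eq_getElem] <;> simp [h]

theorem pvGet_set_ne (xs : List Int) (a j : Nat) (v : Int) (h : j < xs.length) (hne : a ≠ j) :
    PySem.List.pyGetD (xs.set a v) (j : Int) 1 = PySem.List.pyGetD xs (j : Int) 1 := by
  rw [PySem.List.pyGetD_eq_getElem, PySem.List.pyGetD_eq_getElem] <;>
    simp [h, List.getElem_set_ne, hne]

theorem pvRepArr (u : List Char) (s : Nat) (hs : 0 < s) (t : Int)
    (rep0 : List Int)
    (hlen : rep0.length = u.length)
    (ht : t ≤ (u.length : Int) - 2 * s)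
    (h1 : ∀ j : Nat, t < (j : Int) → j < u.length →
      PySem.List.pyGetD rep0 (j : Int) 1 = (pvRepF u s hs j : Int))
    (h2 : ∀ j : Nat, (j : Int) ≤ t → j < u.length →
      PySem.List.pyGetD rep0 (j : Int) 1 = 1) :
    ∀ j : Nat, j < u.length →
      PySem.List.pyGetD ((PySem.List.pyRange t (-1) (-1)).foldl (fun rep i =>
        if PySem.List.slice u (some i) (some (i + (s : Int))) =
           PySem.List.slice u (some (i + (s : Int))) (some (i + 2 * (s : Int)))
        then rep.set i.toNat (PySem.List.pyGetD rep (i + (s : Int)) 1 + 1)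
        else rep) rep0) (j : Int) 1 = (pvRepF u s hs j : Int) := by
  intro j hj
  by_cases hneg : t < 0
  · rw [PySem.List.pyRange_neg_one_eq_nil (by omega), List.foldl_nil]
    exact h1 j (by omega) hj
  · have htn : t = ((t.toNat : Nat) : Int) := by omega
    have htn2 : t.toNat + 2 * s ≤ u.length := by omega
    rw [PySem.List.pyRange_neg_one_cons (by omega : (-1 : Int) < t), List.foldl_cons]
    have hcast1 : t + (s : Int) = ((t.toNat + s : Nat) : Int) := by omega
    have hcast2 : t + 2 * (s : Int) = ((t.toNat + 2 * s : Nat) : Int) := by omega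
    have hcond : (PySem.List.slice u (some t) (some (t + (s : Int))) =
        PySem.List.slice u (some (t + (s : Int))) (some (t + 2 * (s : Int))))
        ↔ (pvBlock u s t.toNat = pvBlock u s (t.toNat + s)) := by
      rw [hcast1, hcast2]
      conv_lhs => rw [htn]
      rw [PySem.List.slice_natCast, PySem.List.slice_natCast]
      have e1 : t.toNat + s - t.toNat = s := by omega
      have e2 : t.toNat + 2 * s - (t.toNat + s) = s := by omega
      simp only [Int.toNat_natCast]
      rw [e1, e2]
      unfold pvBlock
      exact Iff.rfl
    by_cases hc : pvBlock u s t.toNat = pvBlock u s (t.toNat + s)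
    · -- the step sets index t
      have hstep : (if PySem.List.slice u (some t) (some (t + (s : Int))) =
            PySem.List.slice u (some (t + (s : Int))) (some (t + 2 * (s : Int)))
          then rep0.set t.toNat (PySem.List.pyGetD rep0 (t + (s : Int)) 1 + 1)
          else rep0)
          = rep0.set t.toNat ((pvRepF u s hs (t.toNat + s) : Int) + 1) := by
        rw [if_pos (hcond.mpr hc), hcast1,
          h1 (t.toNat + s) (by omega) (by omega)]
      rw [hstep]
      refine pvRepArr u s hs (t - 1) _ (by simpa using hlen) (by omega) ?_ ?_ j hj
      · intro j' hj' hj'n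
        by_cases hje : j' = t.toNat
        · subst hje
          rw [pvGet_set_self _ _ _ (by omega)]
          conv_rhs => rw [pvRepF, dif_pos ⟨htn2, hc⟩]
          push_cast; ring
        · have : t < (j' : Int) := by omega
          rw [pvGet_set_ne _ _ _ _ (by omega) (by omega)]
          exact h1 j' this hj'n
      · intro j' hj' hj'n
        rw [pvGet_set_ne _ _ _ _ (by omega) (by omega)]
        exact h2 j' (by omega) hj'n
    · -- the step leaves the array unchanged
      have hstep : (if PySem.List.slice u (some t) (some (t + (s : Int))) =
            PySem.List.slice u (some (t + (s : Int))) (some (t + 2 * (s : Int)))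
          then rep0.set t.toNat (PySem.List.pyGetD rep0 (t + (s : Int)) 1 + 1)
          else rep0) = rep0 := by
        rw [if_neg (fun h => hc (hcond.mp h))]
      rw [hstep]
      refine pvRepArr u s hs (t - 1) rep0 hlen (by omega) ?_ ?_ j hj
      · intro j' hj' hj'n
        by_cases hje : j' = t.toNat
        · subst hje
          rw [h2 t.toNat (by omega) (by omega)]
          rw [pvRepF, dif_neg (fun h => hc h.2)]
          norm_num
        · exact h1 j' (by omega) hj'n
      · intro j' hj' hj'n
        exact h2 j' (by omega) hj'n
termination_by (t + 1).toNat
decreasing_by all_goals omega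

theorem pvRep_one (u : List Char) (s : Nat) (hs : 0 < s) (j : Nat)
    (h : (u.length : Int) - 2 * s < (j : Int)) : pvRepF u s hs j = 1 := by
  rw [pvRepF, dif_neg]
  rintro ⟨h1, -⟩
  omega

theorem pvGet_replicate (m : Nat) (j : Nat) (hj : j < m) :
    PySem.List.pyGetD (List.replicate m (1 : Int)) (j : Int) 1 = 1 := by
  rw [PySem.List.pyGetD_eq_getElem] <;> simp [hj]

-- ===== VERDICT (by name: the statement is the Claim_ definition above) =====
theorem find_all_pattern_repeats_spec : Claim_equal_find_all_pattern_repeats := by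
  intro seq _
  unfold Spec_find_all_pattern_repeats find_all_pattern_repeats find_all_pattern_repeats_alt
  dsimp only
  set u := PySem.Chars.upper seq.toList with hu
  congr 1
  apply PySem.List.foldl_congr_mem
  intro d x hx
  rw [PySem.List.mem_pyRange_one] at hx
  have hx0 : x = ((x.toNat : Nat) : Int) := by omega
  set s := x.toNat with hsdef
  have hs : 0 < s := by omega
  rw [hx0]
  apply PySem.List.foldl_congr_mem
  intro d' i hi
  rw [PySem.List.mem_pyRange_one] at hi
  have hi0 : i = ((i.toNat : Nat) : Int) := by omega
  set p := i.toNat with hpdef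
  have hps : p + s < u.length := by omega
  rw [hi0]
  -- A's while loop computes pvRepF p
  have hcast1 : ((p : Int) + (s : Int)) = ((p + s : Nat) : Int) := by push_cast; ring
  have hpat : PySem.List.slice u (some (p : Int)) (some ((p : Int) + (s : Int)))
      = pvBlock u s p := by
    rw [hcast1, PySem.List.slice_natCast]
    simp [pvBlock]
  have hA : pvWhileA u (PySem.List.slice u (some (p : Int)) (some ((p : Int) + (s : Int))))
      (s : Int) (u.length + 1) (p : Int) = pvRepF u s hs p := by
    rw [hpat]
    exact pvWhileA_eq u s hs (u.length + 1) p (by omega) (by omega)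
  rw [hA]
  -- B's DP array holds pvRepF p
  have hB := pvRepArr u s hs ((u.length : Int) - 2 * s)
    (List.replicate u.length (1 : Int)) (by simp) le_rfl
    (fun j hj hjn => by
      rw [pvGet_replicate u.length j hjn, pvRep_one u s hs j hj]; norm_num)
    (fun j hj hjn => pvGet_replicate u.length j hjn)
    p (by omega)
  rw [hB]
  -- same branch, same key, same counter update
  by_cases hr : 1 < pvRepF u s hs p
  · rw [if_pos hr, if_pos (by exact_mod_cast hr)]
    simp [PySem.Dict.modify]
  · rw [if_neg hr, if_neg (by exact_mod_cast hr)]
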